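-- pv_equiv track=rewrite | github.com/algoldst/Mia_Python_Practice | dicts.py | count_symptom_frequency
-- ===== SOURCE A (Python) =====
-- def count_symptom_frequency(hospital_logs: list) -> dict:
--     symptoms = {}
--     for patient in hospital_logs:
--         patient_symptoms = patient[1:]
--         for patient_symptom in patient_symptoms:
--             if patient_symptom in symptoms:
--                 symptoms[patient_symptom] += 1
--             else:
--                 symptoms[patient_symptom] = 1
--     return symptoms
-- ===== SOURCE B (Python) =====
-- def count_symptom_frequency(hospital_logs: list) -> dict:
--     result = {}
--     flat = [s for patient in hospital_logs for s in patient[1:]]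
--     while flat:
--         first = flat[0]
--         rest = [x for x in flat if x != first]
--         result[first] = len(flat) - len(rest)
--         flat = rest
--     return result
-- ===== Notes on version B (the rewrite author's own statement) =====
-- stated objective: alternative
-- what changed: Replaces A's single-pass dict tally with an iterative partition scheme: flatten all patient[1:] tails into one list, then repeatedly take the first remaining symptom, filter out all its occurrences, and record the removed count until the list is empty.
import Mathlib
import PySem

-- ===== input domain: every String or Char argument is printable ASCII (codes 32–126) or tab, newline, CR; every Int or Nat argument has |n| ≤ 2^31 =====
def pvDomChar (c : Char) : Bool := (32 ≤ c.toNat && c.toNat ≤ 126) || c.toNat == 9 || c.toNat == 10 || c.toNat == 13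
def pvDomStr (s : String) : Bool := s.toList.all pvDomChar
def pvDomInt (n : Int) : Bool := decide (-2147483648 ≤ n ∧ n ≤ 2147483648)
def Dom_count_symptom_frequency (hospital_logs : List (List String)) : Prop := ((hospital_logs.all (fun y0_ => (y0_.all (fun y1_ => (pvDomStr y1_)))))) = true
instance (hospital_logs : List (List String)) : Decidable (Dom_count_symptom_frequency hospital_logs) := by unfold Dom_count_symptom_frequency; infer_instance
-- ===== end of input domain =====

-- B replaces A's running dict tally by an iterative partition scheme: flatten the tails once,
-- then repeatedly split off every occurrence of the current first symptom (objective: alternative).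

-- ===== PORT A =====
-- Port of A: single pass, a dict tally incremented per symptom of each patient[1:].
def count_symptom_frequency (hospital_logs : List (List String)) : List (String × Int) :=
  (hospital_logs.foldl
    (fun symptoms patient =>
      (PySem.List.slice patient (some 1) none).foldl
        (fun d s => if d.contains s then d.insert s (d.getD s 0 + 1) else d.insert s 1)
        symptoms)
    PySem.Dict.empty).items

-- ===== PORT B =====
-- Port of B's while loop: state = (flat, result); each step removes all occurrences of
-- flat's head and records how many were removed. Terminates since `rest` is shorter.
def pvTallyLoop (flat : List String) (result : List (String × Int)) : List (String × Int) :=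
  match flat with
  | [] => result
  | first :: t =>
    let rest := (first :: t).filter (fun x => !(x == first))
    pvTallyLoop rest (result ++ [(first, ((first :: t).length : Int) - (rest.length : Int))])
  termination_by flat.length
  decreasing_by
    simp only [List.filter_cons, beq_self_eq_true, Bool.not_true, List.length_cons]
    exact Nat.lt_succ_of_le (List.length_filter_le _ _)

def count_symptom_frequency_alt (hospital_logs : List (List String)) : List (String × Int) :=
  pvTallyLoop (hospital_logs.flatMap (fun patient => PySem.List.slice patient (some 1) none)) []

-- ===== PRECONDITION & SPEC =====
def Spec_count_symptom_frequency (hospital_logs : List (List String)) (out : List (String × Int)) : Prop := out = count_symptom_frequency_alt hospital_logs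
instance (hospital_logs : List (List String)) (out : List (String × Int)) : Decidable (Spec_count_symptom_frequency hospital_logs out) := by unfold Spec_count_symptom_frequency; infer_instance

-- ===== CLAIM =====
def Claim_equal_count_symptom_frequency : Prop := ∀ (hospital_logs : List (List String)), Dom_count_symptom_frequency hospital_logs → Spec_count_symptom_frequency hospital_logs (count_symptom_frequency hospital_logs)

-- ===== LEMMAS AND PROOFS =====

-- The per-symptom step of A is exactly the Counter step.
lemma step_eq_counter_step (d : PySem.Dict String Int) (s : String) :
    (if d.contains s then d.insert s (d.getD s 0 + 1) else d.insert s 1)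
      = d.insert s (d.getD s 0 + 1) := by
  by_cases h : d.contains s = true
  · simp [h]
  · simp only [Bool.not_eq_true] at h
    rw [if_neg (by simp [h]), PySem.Dict.getD_of_not_contains (d := d) (k := s) (d0 := 0) h]; norm_num

-- Folding the inner loop over each patient's slice equals folding over the flattened list.
lemma nested_foldl_eq_flat (f : PySem.Dict String Int → String → PySem.Dict String Int)
    (logs : List (List String)) (d : PySem.Dict String Int) :
    logs.foldl (fun acc p => (PySem.List.slice p (some 1) none).foldl f acc) d
      = (logs.flatMap (fun p => PySem.List.slice p (some 1) none)).foldl f d := by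
  induction logs generalizing d with
  | nil => rfl
  | cons p rest ih => simp [List.flatMap_cons, List.foldl_append, ih]

-- Discarding s from the first-occurrence set is the set of the filtered list.
lemma ofList_filter_ne (l : List String) (s : String) :
    PySem.Set.ofList (l.filter (fun x => !(x == s))) = (PySem.Set.ofList l).discard s := by
  induction l with
  | nil => rfl
  | cons x t ih =>
    rw [PySem.Set.ofList_cons]
    by_cases h : x = s
    · subst h
      simp only [List.filter_cons, beq_self_eq_true, Bool.not_true]
      simp only [PySem.Set.discard]
      simpa [PySem.Set.discard] using ih
    · have hb : (x == s) = false := by simp [h]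
      have hfc : (x :: t).filter (fun y => !(y == s)) = x :: t.filter (fun y => !(y == s)) := by
        simp [hb]
      rw [hfc, PySem.Set.ofList_cons, ih]
      simp only [PySem.Set.discard, List.filter_cons, hb, Bool.not_false, if_pos,
        List.filter_filter]
      congr 1
      apply List.filter_congr
      intro a _
      rw [Bool.and_comm]

-- length flat - length (filter away s) = count of s.
lemma length_sub_filter_eq_count (l : List String) (s : String) :
    (l.length : Int) - ((l.filter (fun x => !(x == s))).length : Int) = (l.count s : Int) := by
  have h := List.length_eq_countP_add_countP (l := l) (fun x => x == s)
  have h2 : l.countP (fun a => decide ¬(a == s) = true) = l.countP (fun x => !(x == s)) := by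
    apply List.countP_congr; intro x _; simp
  rw [← List.countP_eq_length_filter, List.count, ← h2]
  omega

-- Invariant of B's loop: it appends the first-occurrence keys with their counts.
lemma pvTallyLoop_spec (n : Nat) (flat : List String) (acc : List (String × Int))
    (hn : flat.length ≤ n) :
    pvTallyLoop flat acc
      = acc ++ (PySem.List.dedup flat).map (fun x => (x, (flat.count x : Int))) := by
  induction n generalizing flat acc with
  | zero =>
    have : flat = [] := List.eq_nil_of_length_eq_zero (Nat.le_zero.mp hn)
    subst this; simp [pvTallyLoop]
  | succ n ih =>
    match flat with
    | [] => simp [pvTallyLoop]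
    | first :: t =>
      rw [pvTallyLoop]
      have hrest : (first :: t).filter (fun x => !(x == first)) = t.filter (fun x => !(x == first)) := by
        simp
      have hlen : (t.filter (fun x => !(x == first))).length ≤ n := by
        have := List.length_filter_le (fun x => !(x == first)) t
        simp only [List.length_cons] at hn; omega
      rw [hrest, ih _ _ hlen]
      rw [PySem.List.dedup_eq_ofList, PySem.List.dedup_eq_ofList,
        PySem.Set.ofList_cons, ← ofList_filter_ne]
      have hhead : ((first :: t).length : Int) - ((t.filter (fun x => !(x == first))).length : Int)
          = ((first :: t).count first : Int) := by
        have h0 := length_sub_filter_eq_count (first :: t) first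
        rw [hrest] at h0; exact h0
      have hmap : (PySem.Set.ofList (t.filter (fun x => !(x == first)))).map
            (fun x => (x, ((t.filter (fun y => !(y == first))).count x : Int)))
          = (PySem.Set.ofList (t.filter (fun x => !(x == first)))).map
            (fun x => (x, ((first :: t).count x : Int))) := by
        apply List.map_congr_left
        intro x hx
        have hxne : x ≠ first := by
          have := (PySem.Set.mem_ofList _ x).mp hx
          simp only [List.mem_filter, Bool.not_eq_eq_eq_not, Bool.not_true, beq_eq_false_iff_ne,
            ne_eq] at this
          exact this.2
        have hc : (t.filter (fun y => !(y == first))).count x = (first :: t).count x := by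
          have h1 : (first :: t).count x = t.count x := by
            simp [Ne.symm hxne]
          rw [h1]
          exact List.count_filter (by simp [hxne])
        rw [hc]
      simp only [List.map_cons, List.append_assoc, List.singleton_append, hhead, hmap]

-- ===== VERDICT =====
theorem count_symptom_frequency_spec : Claim_equal_count_symptom_frequency := by
  intro logs _
  unfold Spec_count_symptom_frequency count_symptom_frequency count_symptom_frequency_alt
  rw [funext fun d => funext fun s => step_eq_counter_step d s, nested_foldl_eq_flat,
    PySem.Dict.foldl_insert_getD_add_one_eq_counter, PySem.Dict.items_counter,
    pvTallyLoop_spec _ _ _ (Nat.le_refl _), PySem.List.dedup_eq_ofList]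
  simp
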